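-- pv_equiv track=rewrite | github.com/krepev3/Meercata | python/hooks.py | _format_iptables_output
-- ===== SOURCE A (Python) =====
-- from typing import List
--
-- def _format_iptables_output(text: str) -> str:
--     lines = text.splitlines()
--     sections = []
--     current = None
--     headers: List[str] = []
--     rows: List[List[str]] = []
--
--     def flush():
--         if current is None:
--             return
--         parts = [f"Chain {current}"]
--         if headers:
--             parts.append(_render_table(headers, rows))
--         else:
--             parts.append(" (no rules)")
--         sections.append("\n".join(parts))
--
--     for ln in lines:
--         if not ln.strip():
--             continue
--         if ln.startswith("Chain "):
--             flush()
--             current = ln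
--             headers = []
--             rows = []
--         elif not headers:
--             headers = ln.split()
--         else:
--             rows.append(ln.split())
--     flush()
--     return "\n\n".join(sections)
--
-- def _render_table(headers: List[str], rows: List[List[str]]) -> str:
--     widths = [len(h) for h in headers]
--     for row in rows:
--         if len(row) > len(widths):
--             widths.extend(len(val) for val in row[len(widths):])
--         for i, val in enumerate(row):
--             widths[i] = max(widths[i], len(val))
--     # If some rows are shorter, pad them
--     def fmt(row: List[str]) -> str:
--         padded = row + [""] * (len(widths) - len(row))
--         return "|" + "|".join(f" {val.ljust(widths[i])} " for i, val in enumerate(padded)) + "|"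
--     sep = "+" + "+".join("-" * (w + 2) for w in widths) + "+"
--     lines = [sep, fmt(headers), sep]
--     for row in rows:
--         lines.append(fmt(row))
--     lines.append(sep)
--     return "\n".join(lines)
-- ===== SOURCE B (Python) =====
-- from typing import List
--
-- def _format_iptables_output(text: str) -> str:
--     # Index-vector decomposition: locate the chain-line positions, slice each
--     # section out of the line list, and render tables column-major.
--     lines = [ln for ln in text.splitlines() if ln.strip()]
--     n = len(lines)
--     starts = [i for i, ln in enumerate(lines) if ln.startswith("Chain ")]
--     secs = []
--     for a, b in zip(starts, starts[1:] + [n]):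
--         body = lines[a + 1:b]
--         secs.append("Chain " + lines[a] +
--                     ("\n" + _table(body) if body else "\n (no rules)"))
--     return "\n\n".join(secs)
--
-- def _table(body: List[str]) -> str:
--     # Column-major: build each padded column, then read the grid off row-wise.
--     cells = [ln.split() for ln in body]
--     ncols = max(len(r) for r in cells)
--     cols = []
--     for i in range(ncols):
--         col = [r[i] if i < len(r) else "" for r in cells]
--         w = max(len(v) for v in col)
--         cols.append([" " + v.ljust(w) + " " for v in col])
--     rows = ["|" + "|".join(col[j] for col in cols) + "|" for j in range(len(cells))]
--     sep = "+" + "+".join("-" * len(col[0]) for col in cols) + "+"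
--     return "\n".join([sep, rows[0], sep] + rows[1:] + [sep])
-- ===== Notes on version B (the rewrite author's own statement) =====
-- stated objective: alternative
-- what changed: B abandons A's streaming state machine (mutable current/headers/rows flushed at each chain line, table widths grown row by row): it computes the index vector of chain-line positions, slices each section out of the line list with zip of consecutive indices, and renders each table column-major (build every padded column from the cell grid, then read rows off the columns), instead of row-major formatting against a width list.
import Mathlib
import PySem

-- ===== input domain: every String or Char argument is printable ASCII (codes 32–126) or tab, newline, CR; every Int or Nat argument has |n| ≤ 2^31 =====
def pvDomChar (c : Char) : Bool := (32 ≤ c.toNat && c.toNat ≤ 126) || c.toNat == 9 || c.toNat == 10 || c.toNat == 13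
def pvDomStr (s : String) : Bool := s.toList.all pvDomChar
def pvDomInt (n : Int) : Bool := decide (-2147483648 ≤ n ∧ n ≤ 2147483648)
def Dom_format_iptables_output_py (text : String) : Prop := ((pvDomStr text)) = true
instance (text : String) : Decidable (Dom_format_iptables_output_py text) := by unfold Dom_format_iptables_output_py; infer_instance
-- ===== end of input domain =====

-- B replaces A's streaming state machine by an index-vector decomposition (chain-line positions,
-- sections sliced out by consecutive index pairs) with column-major table rendering; objective:
-- alternative algorithmic decomposition, same exact output.

-- str.ljust(w) (Python built-in, used by both versions)
def pvLjust (v : List Char) (w : Nat) : List Char := v ++ List.replicate (w - v.length) ' '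

-- ===== PORT A =====
-- _render_table: widths grown row by row (extend, then per-cell max via enumerate)
def pvExtendWidths (w : List Nat) (row : List (List Char)) : List Nat :=
  (PySem.List.enumerate row).foldl
    (fun acc p => acc.set p.1.toNat (max (acc.getD p.1.toNat 0) p.2.length))
    (if row.length > w.length then w ++ (row.drop w.length).map (·.length) else w)

def pvFmtA (widths : List Nat) (row : List (List Char)) : List Char :=
  let padded := row ++ List.replicate (widths.length - row.length) ([] : List Char)
  ['|'] ++ PySem.Chars.join ['|']
      ((PySem.List.enumerate padded).map
        (fun p => [' '] ++ pvLjust p.2 (widths.getD p.1.toNat 0) ++ [' '])) ++ ['|']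

def pvSepA (widths : List Nat) : List Char :=
  ['+'] ++ PySem.Chars.join ['+'] (widths.map (fun w => List.replicate (w + 2) '-')) ++ ['+']

def pvRenderA (headers : List (List Char)) (rows : List (List (List Char))) : List Char :=
  let widths := rows.foldl pvExtendWidths (headers.map (·.length))
  PySem.Chars.join ['\n']
    ([pvSepA widths, pvFmtA widths headers, pvSepA widths] ++ rows.map (pvFmtA widths) ++ [pvSepA widths])

def pvFlushA (secs : List (List Char)) (cur : Option (List Char))
    (hs : List (List Char)) (rs : List (List (List Char))) : List (List Char) :=
  match cur with
  | none => secs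
  | some c =>
    let parts := [("Chain ".toList ++ c)]
    let parts := if hs.isEmpty then parts ++ [" (no rules)".toList] else parts ++ [pvRenderA hs rs]
    secs ++ [PySem.Chars.join ['\n'] parts]

def pvStateA := List (List Char) × Option (List Char) × List (List Char) × List (List (List Char))

def pvStepA (st : pvStateA) (ln : List Char) : pvStateA :=
  match st with
  | (secs, cur, hs, rs) =>
    if (PySem.Chars.strip ln).isEmpty then (secs, cur, hs, rs)
    else if PySem.Chars.startswith ln ("Chain ".toList) then
      (pvFlushA secs cur hs rs, some ln, ([] : List (List Char)), ([] : List (List (List Char))))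
    else if hs.isEmpty then (secs, cur, PySem.Chars.split₀ ln, rs)
    else (secs, cur, hs, rs ++ [PySem.Chars.split₀ ln])

def format_iptables_output_py (text : String) : String :=
  let lines := (PySem.Str.splitlines text).map String.toList
  match lines.foldl pvStepA (([] : List (List Char)), none, [], []) with
  | (secs, cur, hs, rs) => String.ofList (PySem.Chars.join "\n\n".toList (pvFlushA secs cur hs rs))

-- ===== PORT B =====
-- _table: column-major rendering — build each padded column of the cell grid, then read rows off
-- the columns.  max(...) over a nonempty sequence ported as (PySem.List.max? …).getD 0 (every call
-- site has cells ≠ [] / col ≠ [], where Python's max returns; it never raises here).  In-range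
-- indexing r[i] / col[j] / rows[0] ported with List.getD (indices produced in range).
def pvTable (body : List (List Char)) : List Char :=
  let cells := body.map PySem.Chars.split₀
  let ncols := (PySem.List.max? (cells.map (fun r => r.length)) (fun x => x)).getD 0
  let cols := (List.range ncols).map (fun i =>
    let col := cells.map (fun r => if i < r.length then r.getD i ([] : List Char) else [])
    let w := (PySem.List.max? (col.map (fun v => v.length)) (fun x => x)).getD 0
    col.map (fun v => [' '] ++ pvLjust v w ++ [' ']))
  let rows := (List.range cells.length).map (fun j =>
    ['|'] ++ PySem.Chars.join ['|'] (cols.map (fun col => col.getD j ([] : List Char))) ++ ['|'])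
  let sep := ['+'] ++ PySem.Chars.join ['+']
      (cols.map (fun col => List.replicate (col.getD 0 ([] : List Char)).length '-')) ++ ['+']
  PySem.Chars.join ['\n'] ([sep, rows.getD 0 [], sep] ++ rows.drop 1 ++ [sep])

-- _format_iptables_output (B): chain-line index vector + zip of consecutive indices + slices
def format_iptables_output_py_alt (text : String) : String :=
  let lines := ((PySem.Str.splitlines text).map String.toList).filter
      (fun ln => !(PySem.Chars.strip ln).isEmpty)
  let starts := ((PySem.List.enumerate lines).filter
      (fun p => PySem.Chars.startswith p.2 ("Chain ".toList))).map (fun p => p.1)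
  let secs := (starts.zip (starts.drop 1 ++ [(lines.length : Int)])).map (fun p =>
    let body := PySem.List.slice lines (some (p.1 + 1)) (some p.2)
    "Chain ".toList ++ (PySem.List.pyGet? lines p.1).getD []
      ++ (if body.isEmpty then "\n (no rules)".toList else '\n' :: pvTable body))
  String.ofList (PySem.Chars.join "\n\n".toList secs)

-- ===== PRECONDITION & SPEC =====
def Spec_format_iptables_output_py (text : String) (out : String) : Prop := out = format_iptables_output_py_alt text
instance (text : String) (out : String) : Decidable (Spec_format_iptables_output_py text out) := by unfold Spec_format_iptables_output_py; infer_instance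

-- ===== CLAIM (what is proved, stated in full; the proofs are below) =====
def Claim_equal_format_iptables_output_py : Prop := ∀ (text : String), Dom_format_iptables_output_py text → Spec_format_iptables_output_py text (format_iptables_output_py text)

-- ===== LEMMAS AND PROOFS =====

-- proof-local helpers: the A-state components corresponding to a pending block c :: rest
def pvHs (rest : List (List Char)) : List (List Char) :=
  match rest with
  | [] => []
  | h :: _ => PySem.Chars.split₀ h

def pvRs (rest : List (List Char)) : List (List (List Char)) :=
  match rest with
  | [] => []
  | _ :: t => t.map PySem.Chars.split₀

def pvFinishA (st : pvStateA) : List (List Char) :=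
  match st with
  | (secs, cur, hs, rs) => pvFlushA secs cur hs rs

-- proof-local: one grouping step / the section a block renders to
def pvAddLine (bs : List (List (List Char))) (ln : List Char) : List (List (List Char)) :=
  if PySem.Chars.startswith ln ("Chain ".toList) then bs ++ [[ln]]
  else if bs.isEmpty then bs
  else bs.dropLast ++ [(bs.getLast?.getD []) ++ [ln]]

def pvSection (block : List (List Char)) : List Char :=
  if block.length = 1 then "Chain ".toList ++ block.headD [] ++ "\n (no rules)".toList
  else "Chain ".toList ++ block.headD [] ++ ['\n'] ++
    pvRenderA (PySem.Chars.split₀ (block.getD 1 [])) ((block.drop 2).map PySem.Chars.split₀)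

-- proof-local: column-wise widths, the index vector, the block a consecutive index pair cuts out
def pvColWidths (headers : List (List Char)) (rows : List (List (List Char))) : List Nat :=
  let allRows := headers :: rows
  let ncols := (allRows.map List.length).foldl max 0
  (List.range ncols).map
    (fun i => (allRows.map (fun r => if i < r.length then (r.getD i []).length else 0)).foldl max 0)

def pvFmtB (widths : List Nat) (row : List (List Char)) : List Char :=
  ['|'] ++ PySem.Chars.join ['|']
      ((PySem.List.enumerate widths).map
        (fun p => [' '] ++ pvLjust (row.getD p.1.toNat []) p.2 ++ [' '])) ++ ['|']

def pvSN (l : List (List Char)) : List Nat :=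
  (List.range l.length).filter (fun i => PySem.Chars.startswith (l.getD i []) ("Chain ".toList))

def pvBlockAt (l : List (List Char)) (p : Nat × Nat) : List (List Char) :=
  l.getD p.1 [] :: (l.drop (p.1 + 1)).take (p.2 - (p.1 + 1))

-- split() of a line with a non-whitespace character is nonempty
theorem pv_split₀_go_ne_nil (s : List Char) : ∀ (cur : List Char) (acc : List (List Char)),
    ((∃ c ∈ s, PySem.Chars.isspace c = false) ∨ cur ≠ [] ∨ acc ≠ []) →
    PySem.Chars.split₀.go s cur acc ≠ [] := by
  induction s with
  | nil =>
    intro cur acc h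
    simp only [PySem.Chars.split₀.go]
    rcases h with ⟨c, hc, _⟩ | hcur | hacc
    · simp at hc
    · rw [if_neg (by simpa using hcur)]; simp
    · split_ifs <;> simpa
  | cons c rest ih =>
    intro cur acc h
    simp only [PySem.Chars.split₀.go]
    by_cases hsp : PySem.Chars.isspace c = true
    · rw [if_pos hsp]
      by_cases hcur : cur.isEmpty = true
      · rw [if_pos hcur]
        apply ih
        rcases h with ⟨d, hd, hds⟩ | hc | hacc
        · rcases List.mem_cons.1 hd with rfl | hd
          · rw [hsp] at hds; cases hds
          · exact Or.inl ⟨d, hd, hds⟩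
        · exact absurd (List.isEmpty_iff.1 hcur) hc
        · exact Or.inr (Or.inr hacc)
      · rw [if_neg hcur]
        exact ih [] (cur.reverse :: acc) (Or.inr (Or.inr (by simp)))
    · rw [if_neg hsp]
      exact ih (c :: cur) acc (Or.inr (Or.inl (by simp)))

theorem pv_split₀_ne_nil (ln : List Char) (h : (PySem.Chars.strip ln).isEmpty = false) :
    PySem.Chars.split₀ ln ≠ [] := by
  have hne : PySem.Chars.strip ln ≠ [] := by
    intro h0; rw [h0] at h; simp at h
  have hex : ∃ c ∈ ln, PySem.Chars.isspace c = false := by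
    by_contra hall
    push_neg at hall
    apply hne
    have hdw : List.dropWhile PySem.Chars.isspace ln = [] := by
      rw [List.dropWhile_eq_nil_iff]
      intro x hx
      cases h1 : PySem.Chars.isspace x
      · exact absurd h1 (hall x hx)
      · rfl
    simp [PySem.Chars.strip, PySem.Chars.lstrip, PySem.Chars.rstrip, hdw]
  exact pv_split₀_go_ne_nil ln [] [] (Or.inl hex)

-- getD through map
theorem pv_getD_map (r : List (List Char)) (j : Nat) :
    (r.map (fun v => v.length)).getD j 0 = if j < r.length then (r.getD j []).length else 0 := by
  by_cases hj : j < r.length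
  · rw [List.getD_eq_getElem _ _ (by simpa using hj), List.getD_eq_getElem _ _ hj]
    simp [hj]
  · simp [List.getD, List.getElem?_eq_none (by simpa using Nat.le_of_not_lt hj)]

-- the enumerate/set inner loop of A's width pass
theorem pv_setfold_length (r : List (List Char)) : ∀ (k : Nat) (w : List Nat),
    ((PySem.List.enumerate r (k : Int)).foldl
      (fun acc p => acc.set p.1.toNat (max (acc.getD p.1.toNat 0) p.2.length)) w).length = w.length := by
  induction r with
  | nil => intro k w; simp [PySem.List.enumerate_nil]
  | cons x xs ih =>
    intro k w
    rw [PySem.List.enumerate_cons]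
    simp only [List.foldl_cons]
    have hc : (k : Int) + 1 = ((k + 1 : Nat) : Int) := by push_cast; ring
    rw [hc, ih (k + 1)]
    simp

theorem pv_setfold_getD (r : List (List Char)) : ∀ (k : Nat) (w : List Nat), k + r.length ≤ w.length →
    ∀ (j : Nat),
    ((PySem.List.enumerate r (k : Int)).foldl
      (fun acc p => acc.set p.1.toNat (max (acc.getD p.1.toNat 0) p.2.length)) w).getD j 0 =
      if k ≤ j ∧ j < k + r.length then max (w.getD j 0) (r.getD (j - k) []).length
      else w.getD j 0 := by
  induction r with
  | nil =>
    intro k w _ j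
    rw [PySem.List.enumerate_nil]
    simp only [List.foldl_nil]
    rw [if_neg (by simp only [List.length_nil]; omega)]
  | cons x xs ih =>
    intro k w hw j
    rw [PySem.List.enumerate_cons]
    simp only [List.foldl_cons]
    have hc : (k : Int) + 1 = ((k + 1 : Nat) : Int) := by push_cast; ring
    have hkt : ((k : Int)).toNat = k := by simp
    rw [hc, hkt]
    have hkw : k < w.length := by simp at hw; omega
    rw [ih (k + 1) _ (by rw [List.length_set]; simp at hw; omega) j]
    have hw' : ∀ (m : Nat), (w.set k (max (w.getD k 0) x.length)).getD m 0 =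
        if k = m then max (w.getD k 0) x.length else w.getD m 0 := by
      intro m
      simp only [List.getD, List.getElem?_set, if_pos hkw]
      split_ifs with h1
      · rfl
      · rfl
    by_cases hkj : k = j
    · subst hkj
      rw [if_neg (show ¬(k + 1 ≤ k ∧ k < k + 1 + xs.length) from by omega)]
      rw [if_pos (show k ≤ k ∧ k < k + (x :: xs).length from by simp)]
      rw [hw' k, if_pos rfl]
      simp
    · simp only [hw' j, if_neg hkj]
      by_cases hin : k + 1 ≤ j ∧ j < k + 1 + xs.length
      · rw [if_pos hin, if_pos (show k ≤ j ∧ j < k + (x :: xs).length from by simp; omega)]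
        rw [show j - k = (j - (k + 1)) + 1 from by omega, List.getD_cons_succ]
      · rw [if_neg hin, if_neg (show ¬(k ≤ j ∧ j < k + (x :: xs).length) from by simp; omega)]

theorem pv_extend_length (w : List Nat) (r : List (List Char)) :
    (pvExtendWidths w r).length = max w.length r.length := by
  unfold pvExtendWidths
  have h0 : ((0 : Int)) = ((0 : Nat) : Int) := by norm_num
  rw [show PySem.List.enumerate r = PySem.List.enumerate r ((0 : Nat) : Int) by rw [← h0]]
  rw [pv_setfold_length r 0]
  split_ifs with hgt
  · simp; omega
  · omega

theorem pv_extend_getD (w : List Nat) (r : List (List Char)) (j : Nat) :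
    (pvExtendWidths w r).getD j 0 = max (w.getD j 0) ((r.map (fun v => v.length)).getD j 0) := by
  unfold pvExtendWidths
  have h0 : ((0 : Int)) = ((0 : Nat) : Int) := by norm_num
  rw [show PySem.List.enumerate r = PySem.List.enumerate r ((0 : Nat) : Int) by rw [← h0]]
  rw [pv_setfold_getD r 0 _ (by split_ifs with hgt <;> simp <;> omega) j]
  simp only [Nat.zero_add, Nat.zero_le, true_and, Nat.sub_zero]
  rw [pv_getD_map]
  by_cases hjr : j < r.length
  · rw [if_pos hjr, if_pos hjr]
    by_cases hjw : j < w.length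
    · have : (if r.length > w.length then w ++ (r.drop w.length).map (·.length) else w).getD j 0 = w.getD j 0 := by
        split_ifs with hgt
        · rw [List.getD_append _ _ _ _ hjw]
        · rfl
      rw [this]
    · have hgt : r.length > w.length := by omega
      rw [if_pos hgt]
      have : (w ++ (r.drop w.length).map (·.length)).getD j 0 = (r.getD j []).length := by
        rw [List.getD_append_right _ _ _ _ (by omega)]
        simp only [List.getD, List.getElem?_map, List.getElem?_drop]
        rw [show w.length + (j - w.length) = j by omega]
        rw [List.getElem?_eq_getElem hjr]
        simp
      rw [this]
      have hw0 : w.getD j 0 = 0 := by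
        simp [List.getD, List.getElem?_eq_none (by omega : w.length ≤ j)]
      rw [hw0]
      omega
  · rw [if_neg hjr, if_neg hjr]
    by_cases hjw : j < w.length
    · have hng : ¬ r.length > w.length := by omega
      rw [if_neg hng]
      omega
    · have hz : ∀ (l : List Nat), l.length ≤ j → l.getD j 0 = 0 := by
        intro l hl
        simp [List.getD, List.getElem?_eq_none hl]
      split_ifs with hgt
      · rw [hz _ (by simp; omega), hz w (by omega)]
        omega
      · rw [hz w (by omega)]
        omega

theorem pv_widths_foldl_length (rows : List (List (List Char))) : ∀ (w0 : List Nat),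
    (rows.foldl pvExtendWidths w0).length = rows.foldl (fun m r => max m r.length) w0.length := by
  induction rows with
  | nil => intro w0; rfl
  | cons r t ih => intro w0; simp only [List.foldl_cons]; rw [ih, pv_extend_length]

theorem pv_widths_foldl_getD (rows : List (List (List Char))) : ∀ (w0 : List Nat) (j : Nat),
    (rows.foldl pvExtendWidths w0).getD j 0 =
      rows.foldl (fun m r => max m ((r.map (fun v => v.length)).getD j 0)) (w0.getD j 0) := by
  induction rows with
  | nil => intro w0 j; rfl
  | cons r t ih => intro w0 j; simp only [List.foldl_cons]; rw [ih, pv_extend_getD]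

-- A's width pass equals the column-wise widths
theorem pv_widths_eq (headers : List (List Char)) (rows : List (List (List Char))) :
    rows.foldl pvExtendWidths (headers.map (fun v => v.length)) = pvColWidths headers rows := by
  simp only [pvColWidths]
  have hlen : (rows.foldl pvExtendWidths (headers.map (fun v => v.length))).length =
      ((headers :: rows).map List.length).foldl max 0 := by
    rw [pv_widths_foldl_length]
    simp only [List.map_cons, List.foldl_cons, List.foldl_map]
    rw [show max 0 headers.length = headers.length by omega]
    simp
  apply List.ext_getElem
  · rw [hlen]; simp
  · intro i hi1 hi2
    rw [← List.getD_eq_getElem _ 0 hi1]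
    rw [pv_widths_foldl_getD]
    simp only [List.getElem_map, List.getElem_range]
    have hterm : ((headers :: rows).map
        (fun r => if i < r.length then (r.getD i []).length else 0)) =
        (headers :: rows).map (fun r => (r.map (fun v => v.length)).getD i 0) :=
      List.map_congr_left (fun r _ => (pv_getD_map r i).symm)
    rw [hterm]
    simp only [List.map_cons, List.foldl_cons, List.foldl_map]
    rw [show max 0 ((headers.map (fun v => v.length)).getD i 0) =
        (headers.map (fun v => v.length)).getD i 0 by omega]

-- generic: equal maps over two enumerations of equal length
theorem pv_map_enumerate_eq {α β γ : Type} (xs : List α) : ∀ (ys : List β)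
    (f : Int × α → γ) (g : Int × β → γ) (k : Nat), xs.length = ys.length →
    (∀ (j : Nat) (h1 : j < xs.length) (h2 : j < ys.length), f (((k + j : Nat) : Int), xs[j]) = g (((k + j : Nat) : Int), ys[j])) →
    (PySem.List.enumerate xs (k : Int)).map f = (PySem.List.enumerate ys (k : Int)).map g := by
  induction xs with
  | nil =>
    intro ys f g k hlen h
    cases ys with
    | nil => simp [PySem.List.enumerate_nil]
    | cons y yt => simp at hlen
  | cons x xs ih =>
    intro ys f g k hlen h
    cases ys with
    | nil => simp at hlen
    | cons y yt =>
      rw [PySem.List.enumerate_cons, PySem.List.enumerate_cons]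
      simp only [List.map_cons]
      have hc : (k : Int) + 1 = ((k + 1 : Nat) : Int) := by push_cast; ring
      congr 1
      · have h0 := h 0 (by simp) (by simp)
        simpa using h0
      · rw [hc]
        apply ih yt f g (k + 1) (by simpa using hlen)
        intro j h1 h2
        have hj := h (j + 1) (by simpa using h1) (by simpa using h2)
        simpa [show k + (j + 1) = k + 1 + j from by omega] using hj

theorem pv_fmt_eq (widths : List Nat) (row : List (List Char)) (h : row.length ≤ widths.length) :
    pvFmtA widths row = pvFmtB widths row := by
  simp only [pvFmtA, pvFmtB]
  have h0 : ((0 : Int)) = ((0 : Nat) : Int) := by norm_num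
  rw [show PySem.List.enumerate (row ++ List.replicate (widths.length - row.length) ([] : List Char))
        = PySem.List.enumerate (row ++ List.replicate (widths.length - row.length) ([] : List Char)) ((0 : Nat) : Int) by rw [← h0]]
  rw [show PySem.List.enumerate widths = PySem.List.enumerate widths ((0 : Nat) : Int) by rw [← h0]]
  rw [pv_map_enumerate_eq _ widths _ _ 0 (by simp; omega) ?_]
  intro j h1 h2
  have h2' : j < widths.length := h2
  have hjt : (((0 + j : Nat) : Int)).toNat = j := by simp
  simp only [hjt]
  rw [List.getD_eq_getElem widths 0 h2']
  congr 2
  by_cases hjr : j < row.length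
  · rw [List.getElem_append_left hjr, List.getD_eq_getElem row [] hjr]
  · rw [List.getElem_append_right (by omega)]
    simp only [List.getElem_replicate]
    simp [List.getD, List.getElem?_eq_none (by omega : row.length ≤ j)]

-- flushing the pending block is exactly the section of that block
theorem pv_flush_section (secs : List (List Char)) (c : List Char) (rest : List (List Char))
    (h : ∀ ln ∈ rest, (PySem.Chars.strip ln).isEmpty = false) :
    pvFlushA secs (some c) (pvHs rest) (pvRs rest) = secs ++ [pvSection (c :: rest)] := by
  cases rest with
  | nil =>
    have h1 : pvFlushA secs (some c) (pvHs []) (pvRs []) =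
        secs ++ [PySem.Chars.join ['\n'] ["Chain ".toList ++ c, " (no rules)".toList]] := rfl
    have h2 : pvSection [c] = "Chain ".toList ++ c ++ "\n (no rules)".toList := rfl
    rw [h1, h2, PySem.Chars.join_cons_cons, PySem.Chars.join_singleton]
    have hlit : ('\n' :: " (no rules)".toList) = "\n (no rules)".toList := rfl
    simp only [List.append_assoc, List.singleton_append, hlit]
  | cons hline t =>
    have hsp : PySem.Chars.split₀ hline ≠ [] := pv_split₀_ne_nil hline (h hline (by simp))
    simp only [pvHs, pvRs, pvFlushA, pvSection]
    rw [if_neg (by simpa using hsp)]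
    congr 1
    simp only [List.singleton_append]
    rw [PySem.Chars.join_cons_cons, PySem.Chars.join_singleton]
    rw [if_neg (by simp)]
    have hget : (c :: hline :: t).getD 1 [] = hline := rfl
    have hdrop : (c :: hline :: t).drop 2 = t := rfl
    rw [hget, hdrop]
    simp

-- skipping blank lines up front does not change A's loop
theorem pv_foldA_filter (L : List (List Char)) : ∀ (st : pvStateA),
    L.foldl pvStepA st = (L.filter (fun ln => !(PySem.Chars.strip ln).isEmpty)).foldl pvStepA st := by
  induction L with
  | nil => intro st; rfl
  | cons ln t ih =>
    intro st
    simp only [List.foldl_cons, List.filter_cons]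
    by_cases hb : (PySem.Chars.strip ln).isEmpty = true
    · have hskip : pvStepA st ln = st := by
        obtain ⟨secs, cur, hs, rs⟩ := st
        simp [pvStepA, hb]
      rw [hb, hskip]
      simpa using ih st
    · have hb' : (PySem.Chars.strip ln).isEmpty = false := by simpa using hb
      rw [hb']
      simp only [Bool.not_false, if_pos]
      rw [List.foldl_cons]
      exact ih (pvStepA st ln)

-- main invariant: A's state machine tracks the block grouping
theorem pv_main_run (L : List (List Char)) : ∀ (hl : ∀ ln ∈ L, (PySem.Chars.strip ln).isEmpty = false)
    (done : List (List (List Char))) (c : List Char) (rest : List (List Char))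
    (hrest : ∀ ln ∈ rest, (PySem.Chars.strip ln).isEmpty = false),
    pvFinishA (L.foldl pvStepA (done.map pvSection, some c, pvHs rest, pvRs rest)) =
      (L.foldl pvAddLine (done ++ [c :: rest])).map pvSection := by
  induction L with
  | nil =>
    intro _ done c rest hrest
    simp only [List.foldl_nil, pvFinishA]
    rw [pv_flush_section _ _ _ hrest]
    simp
  | cons ln t ih =>
    intro hl done c rest hrest
    have hln : (PySem.Chars.strip ln).isEmpty = false := hl ln (by simp)
    have hlt : ∀ l ∈ t, (PySem.Chars.strip l).isEmpty = false := fun l hlm => hl l (by simp [hlm])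
    simp only [List.foldl_cons]
    by_cases hch : PySem.Chars.startswith ln ("Chain ".toList) = true
    · have hchl : PySem.Chars.startswith ln ['C', 'h', 'a', 'i', 'n', ' '] = true := by
        simpa using hch
      have hstep : pvStepA (done.map pvSection, some c, pvHs rest, pvRs rest) ln
          = (((done ++ [c :: rest]).map pvSection : List (List Char)), some ln,
             ([] : List (List Char)), ([] : List (List (List Char)))) := by
        simp only [pvStepA, hln, hch, hchl, Bool.false_eq_true, if_false, if_true]
        rw [pv_flush_section _ _ _ hrest]
        simp
      rw [hstep]
      have hrun := ih hlt (done ++ [c :: rest]) ln [] (by simp)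
      simp only [pvHs, pvRs] at hrun
      rw [hrun]
      have haddb : pvAddLine (done ++ [c :: rest]) ln = (done ++ [c :: rest]) ++ [[ln]] := by
        simp [pvAddLine, hch, hchl]
      rw [haddb]
    · have hch' : PySem.Chars.startswith ln ("Chain ".toList) = false := by simpa using hch
      have hchl : PySem.Chars.startswith ln ['C', 'h', 'a', 'i', 'n', ' '] = false := by
        simpa using hch'
      cases rest with
      | nil =>
        have hstep : pvStepA (done.map pvSection, some c, pvHs ([] : List (List Char)), pvRs []) ln
            = (done.map pvSection, some c, PySem.Chars.split₀ ln, pvRs []) := by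
          simp [pvStepA, hln, hch', hchl, pvHs, pvRs]
        rw [hstep]
        have hrun := ih hlt done c [ln] (by intro l hl2; simp at hl2; subst hl2; exact hln)
        simp only [pvHs, pvRs, List.map_nil] at hrun ⊢
        rw [hrun]
        have haddb : pvAddLine (done ++ [[c]]) ln = done ++ [[c, ln]] := by
          simp [pvAddLine, hch', hchl, List.dropLast_concat, List.getLast?_concat]
        rw [haddb]
      | cons hline t2 =>
        have hsp : PySem.Chars.split₀ hline ≠ [] := pv_split₀_ne_nil hline (hrest hline (by simp))
        have hstep : pvStepA (done.map pvSection, some c, pvHs (hline :: t2), pvRs (hline :: t2)) ln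
            = (done.map pvSection, some c, pvHs (hline :: (t2 ++ [ln])), pvRs (hline :: (t2 ++ [ln]))) := by
          simp only [pvStepA, hln, hch', hchl, pvHs, pvRs, Bool.false_eq_true, if_false]
          rw [if_neg (by simpa using hsp)]
          simp
        rw [hstep]
        have hrun := ih hlt done c (hline :: (t2 ++ [ln])) (by
          intro l hl2
          rcases List.mem_cons.1 hl2 with rfl | hl3
          · exact hrest l (by simp)
          · rcases List.mem_append.1 hl3 with hl4 | hl4
            · exact hrest l (by simp [hl4])
            · simp at hl4; subst hl4; exact hln)
        rw [hrun]
        have haddb : pvAddLine (done ++ [c :: hline :: t2]) ln = done ++ [c :: hline :: (t2 ++ [ln])] := by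
          simp [pvAddLine, hch', hchl, List.dropLast_concat, List.getLast?_concat]
        rw [haddb]

theorem pv_main_none (L : List (List Char)) : ∀ (hl : ∀ ln ∈ L, (PySem.Chars.strip ln).isEmpty = false)
    (hs : List (List Char)) (rs : List (List (List Char))),
    pvFinishA (L.foldl pvStepA ([], none, hs, rs)) = (L.foldl pvAddLine []).map pvSection := by
  induction L with
  | nil => intro _ hs rs; simp [pvFinishA, pvFlushA]
  | cons ln t ih =>
    intro hl hs rs
    have hln : (PySem.Chars.strip ln).isEmpty = false := hl ln (by simp)
    have hlt : ∀ l ∈ t, (PySem.Chars.strip l).isEmpty = false := fun l hlm => hl l (by simp [hlm])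
    simp only [List.foldl_cons]
    by_cases hch : PySem.Chars.startswith ln ("Chain ".toList) = true
    · have hchl : PySem.Chars.startswith ln ['C', 'h', 'a', 'i', 'n', ' '] = true := by
        simpa using hch
      have hstep : pvStepA (([] : List (List Char)), none, hs, rs) ln
          = (([] : List (List Char)), some ln, ([] : List (List Char)), ([] : List (List (List Char)))) := by
        simp [pvStepA, hln, hch, hchl, pvFlushA]
      rw [hstep]
      have hrun := pv_main_run t hlt [] ln [] (by simp)
      simp only [pvHs, pvRs, List.map_nil, List.nil_append] at hrun
      rw [hrun]
      have haddb : pvAddLine ([] : List (List (List Char))) ln = [[ln]] := by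
        simp [pvAddLine, hch, hchl]
      rw [haddb]
    · have hch' : PySem.Chars.startswith ln ("Chain ".toList) = false := by simpa using hch
      have hchl : PySem.Chars.startswith ln ['C', 'h', 'a', 'i', 'n', ' '] = false := by
        simpa using hch'
      have haddb : pvAddLine ([] : List (List (List Char))) ln = [] := by
        simp [pvAddLine, hch', hchl]
      rw [haddb]
      by_cases hhs : hs.isEmpty = true
      · have hstep : pvStepA (([] : List (List Char)), none, hs, rs) ln
            = (([] : List (List Char)), none, PySem.Chars.split₀ ln, rs) := by
          simp [pvStepA, hln, hch', hchl, hhs]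
        rw [hstep]
        exact ih hlt _ _
      · have hstep : pvStepA (([] : List (List Char)), none, hs, rs) ln
            = (([] : List (List Char)), none, hs, rs ++ [PySem.Chars.split₀ ln]) := by
          simp [pvStepA, hln, hch', hchl, hhs]
        rw [hstep]
        exact ih hlt _ _

-- ===== B-side lemmas =====
theorem pv_enum_eq {α : Type} (d : α) (l : List α) : ∀ (k : Nat),
    PySem.List.enumerate l ((k : Nat) : Int)
      = (List.range l.length).map (fun i => (((k + i : Nat) : Int), l.getD i d)) := by
  induction l with
  | nil => intro k; simp [PySem.List.enumerate_nil]
  | cons x xs ih =>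
    intro k
    rw [PySem.List.enumerate_cons]
    have hc : ((k : Nat) : Int) + 1 = (((k + 1 : Nat)) : Int) := by push_cast; ring
    rw [hc, ih (k + 1)]
    simp only [List.length_cons, List.range_succ_eq_map, List.map_cons, List.map_map]
    congr 1
    apply List.map_congr_left
    intro i _
    simp only [Function.comp_apply, Nat.succ_eq_add_one, List.getD_cons_succ]
    rw [show k + (i + 1) = k + 1 + i from by omega]

theorem pv_map_eq_range_map {α β : Type} (l : List α) (d : α) (f : α → β) :
    (List.range l.length).map (fun i => f (l.getD i d)) = l.map f := by
  apply List.ext_getElem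
  · simp
  · intro i h1 h2
    have : i < l.length := by simpa using h2
    simp [List.getD, List.getElem?_eq_getElem this]

theorem pv_starts_eq (l : List (List Char)) :
    ((PySem.List.enumerate l).filter (fun p => PySem.Chars.startswith p.2 ("Chain ".toList))).map
        (fun p => p.1)
      = List.map (fun i : Nat => (i : Int)) (pvSN l) := by
  have h0 : PySem.List.enumerate l = PySem.List.enumerate l ((0 : Nat) : Int) := by norm_num
  rw [h0, pv_enum_eq ([] : List Char) l 0]
  rw [List.filter_map, List.map_map]
  simp only [pvSN]
  have hpred : (List.range l.length).filter
      ((fun p => PySem.Chars.startswith p.2 ("Chain ".toList)) ∘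
        (fun i => (((0 + i : Nat) : Int), l.getD i [])))
      = (List.range l.length).filter
          (fun i => PySem.Chars.startswith (l.getD i []) ("Chain ".toList)) := by
    apply List.filter_congr
    intro i _
    rfl
  rw [hpred]
  apply List.map_congr_left
  intro i _
  simp

theorem pv_sN_mem {l : List (List Char)} {i : Nat} (h : i ∈ pvSN l) : i < l.length := by
  have := (List.mem_filter.1 h).1
  simpa using this

theorem pv_sN_pairwise (l : List (List Char)) : (pvSN l).Pairwise (· < ·) := by
  exact List.Pairwise.filter _ List.pairwise_lt_range

theorem pv_sN_append (l : List (List Char)) (x : List Char) :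
    pvSN (l ++ [x]) = pvSN l ++
      (if PySem.Chars.startswith x ("Chain ".toList) then [l.length] else []) := by
  simp only [pvSN, List.length_append, List.length_singleton]
  rw [List.range_succ, List.filter_append]
  congr 1
  · apply List.filter_congr
    intro i hi
    have hi' : i < l.length := by simpa using hi
    congr 1
    simp [List.getD, List.getElem?_append_left hi']
  · have hx : (l ++ [x]).getD l.length [] = x := by
      simp [List.getD]
    simp only [List.filter, hx]
    split_ifs <;> simp_all

theorem pv_zip_bounds (n : Nat) : ∀ (s : List Nat), s.Pairwise (· < ·) → (∀ a ∈ s, a < n) →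
    ∀ p ∈ s.zip (s.drop 1 ++ [n]), p.1 < p.2 ∧ p.2 ≤ n := by
  intro s
  induction s with
  | nil => intro _ _ p hp; simp at hp
  | cons a t ih =>
    intro hpw hbd p hp
    cases t with
    | nil =>
      simp only [List.drop_succ_cons, List.drop_nil, List.nil_append, List.zip_cons_cons,
        List.zip_nil_right] at hp
      simp at hp
      subst hp
      exact ⟨hbd a (by simp), le_refl n⟩
    | cons a2 t2 =>
      simp only [List.drop_succ_cons, List.drop_zero] at hp
      rw [show (a2 :: t2 ++ [n] : List Nat) = a2 :: (t2 ++ [n]) from by simp] at hp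
      rw [List.zip_cons_cons] at hp
      rcases List.mem_cons.1 hp with rfl | hp2
      · exact ⟨(List.pairwise_cons.1 hpw).1 a2 (by simp), le_of_lt (hbd a2 (by simp))⟩
      · have := ih (List.pairwise_cons.1 hpw).2 (fun b hb => hbd b (by simp [hb]))
        apply this
        simpa using hp2

theorem pv_blockAt_stable (l : List (List Char)) (x : List Char) (a b : Nat)
    (hab : a < b) (hb : b ≤ l.length) :
    pvBlockAt (l ++ [x]) (a, b) = pvBlockAt l (a, b) := by
  simp only [pvBlockAt]
  congr 1
  · simp [List.getD, List.getElem?_append_left (show a < l.length by omega)]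
  · rw [List.drop_append_of_le_length (by omega)]
    rw [List.take_append_of_le_length (by simp; omega)]

theorem pv_blockAt_bump (l : List (List Char)) (x : List Char) (a : Nat) (ha : a < l.length) :
    pvBlockAt (l ++ [x]) (a, l.length + 1) = pvBlockAt l (a, l.length) ++ [x] := by
  simp only [pvBlockAt]
  rw [List.cons_append]
  congr 1
  · simp [List.getD, List.getElem?_append_left ha]
  · rw [List.drop_append_of_le_length (by omega)]
    rw [List.take_of_length_le (by simp; omega)]
    rw [List.take_of_length_le (by simp)]

theorem pv_blockAt_new (l : List (List Char)) (x : List Char) :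
    pvBlockAt (l ++ [x]) (l.length, l.length + 1) = [x] := by
  simp [pvBlockAt, List.getD]

theorem pv_getLast?_cons_ne {α : Type} (a : α) (l : List α) (h : l ≠ []) :
    (a :: l).getLast? = l.getLast? := by
  cases l with
  | nil => exact absurd rfl h
  | cons b t => simp [List.getLast?_cons_cons]

theorem pv_map_zip_bump (l : List (List Char)) (x : List Char) : ∀ (s : List Nat),
    s.Pairwise (· < ·) → (∀ a ∈ s, a < l.length) → s ≠ [] →
    (s.zip (s.drop 1 ++ [l.length + 1])).map (pvBlockAt (l ++ [x]))
      = ((s.zip (s.drop 1 ++ [l.length])).map (pvBlockAt l)).dropLast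
        ++ [((s.zip (s.drop 1 ++ [l.length])).map (pvBlockAt l)).getLast?.getD [] ++ [x]] := by
  intro s
  induction s with
  | nil => intro _ _ h; exact absurd rfl h
  | cons a t ih =>
    intro hpw hbd _
    cases t with
    | nil =>
      simp only [List.drop_succ_cons, List.drop_nil, List.nil_append, List.zip_cons_cons,
        List.zip_nil_right, List.map_cons, List.map_nil]
      rw [pv_blockAt_bump l x a (hbd a (by simp))]
      simp
    | cons a2 t2 =>
      have ha2n : a2 < l.length := hbd a2 (by simp)
      have haa2 : a < a2 := (List.pairwise_cons.1 hpw).1 a2 (by simp)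
      simp only [List.drop_succ_cons, List.drop_zero]
      rw [show (a2 :: t2 ++ [l.length + 1] : List Nat) = a2 :: (t2 ++ [l.length + 1]) from by simp]
      rw [show (a2 :: t2 ++ [l.length] : List Nat) = a2 :: (t2 ++ [l.length]) from by simp]
      rw [List.zip_cons_cons, List.zip_cons_cons, List.map_cons, List.map_cons]
      have hne : (List.map (pvBlockAt l) ((a2 :: t2).zip (t2 ++ [l.length]))) ≠ [] := by
        apply List.ne_nil_of_length_pos
        simp [List.length_zip]
      have hih := ih (List.pairwise_cons.1 hpw).2 (fun b hb => hbd b (by simp [hb])) (by simp)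
      simp only [List.drop_succ_cons, List.drop_zero] at hih
      rw [hih]
      rw [pv_blockAt_stable l x a a2 haa2 (le_of_lt ha2n)]
      rw [List.dropLast_cons_of_ne_nil hne, pv_getLast?_cons_ne _ _ hne]
      simp

theorem pv_blocks_eq : ∀ (lines : List (List Char)),
    ((pvSN lines).zip ((pvSN lines).drop 1 ++ [lines.length])).map (pvBlockAt lines)
      = lines.foldl pvAddLine [] := by
  intro lines
  induction lines using List.reverseRecOn with
  | nil => simp [pvSN]
  | append_singleton l x ih =>
    rw [List.foldl_append, List.foldl_cons, List.foldl_nil, ← ih]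
    rw [pv_sN_append]
    by_cases hch : PySem.Chars.startswith x ("Chain ".toList) = true
    · have hch' : PySem.Chars.startswith x ['C', 'h', 'a', 'i', 'n', ' '] = true := by
        simpa using hch
      rw [if_pos hch]
      cases hs : pvSN l with
      | nil =>
        simp only [List.nil_append, List.zip_nil_left, List.map_nil, List.length_append,
          List.length_singleton, List.drop_succ_cons, List.drop_nil, List.zip_cons_cons,
          List.zip_nil_right, List.map_cons]
        rw [pv_blockAt_new]
        simp [pvAddLine, hch, hch']
      | cons s0 st =>
        rw [← hs]
        have hsnn : pvSN l ≠ [] := by rw [hs]; simp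
        have hpos : 0 < (pvSN l).length := List.length_pos_of_ne_nil hsnn
        have hd1 : (pvSN l ++ [l.length]).drop 1 = (pvSN l).drop 1 ++ [l.length] :=
          List.drop_append_of_le_length (by omega)
        simp only [List.length_append, List.length_singleton]
        rw [hd1]
        rw [List.zip_append (by rw [List.length_append, List.length_drop, List.length_singleton]; omega)]
        rw [List.map_append]
        have hmap1 : ((pvSN l).zip ((pvSN l).drop 1 ++ [l.length])).map (pvBlockAt (l ++ [x]))
            = ((pvSN l).zip ((pvSN l).drop 1 ++ [l.length])).map (pvBlockAt l) := by
          apply List.map_congr_left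
          intro p hp
          have hb := pv_zip_bounds l.length (pvSN l) (pv_sN_pairwise l)
            (fun a ha => pv_sN_mem ha) p hp
          obtain ⟨p1, p2⟩ := p
          exact pv_blockAt_stable l x p1 p2 hb.1 hb.2
        rw [hmap1]
        simp only [List.zip_cons_cons, List.zip_nil_right, List.map_cons, List.map_nil]
        rw [pv_blockAt_new]
        simp [pvAddLine, hch, hch']
    · have hch' : PySem.Chars.startswith x ['C', 'h', 'a', 'i', 'n', ' '] = false := by
        simpa using hch
      rw [if_neg hch]
      simp only [List.append_nil]
      cases hs : pvSN l with
      | nil =>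
        simp [pvAddLine, hch']
      | cons s0 st =>
        rw [← hs]
        have hsnn : pvSN l ≠ [] := by rw [hs]; simp
        have hbnn : ((pvSN l).zip ((pvSN l).drop 1 ++ [l.length])).map (pvBlockAt l) ≠ [] := by
          apply List.ne_nil_of_length_pos
          rw [List.length_map, List.length_zip]
          rw [List.length_append, List.length_drop]
          rw [hs]; simp
        simp only [List.length_append, List.length_singleton]
        rw [pv_map_zip_bump l x (pvSN l) (pv_sN_pairwise l) (fun a ha => pv_sN_mem ha) hsnn]
        simp only [pvAddLine, hch, hch', Bool.false_eq_true, if_false]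
        rw [if_neg (by simpa using hbnn)]

theorem pv_ljust_len (v : List Char) (w : Nat) (h : v.length ≤ w) : (pvLjust v w).length = w := by
  simp [pvLjust]; omega

theorem pv_if_getD' (r : List (List Char)) (i : Nat) :
    (if i < r.length then r.getD i [] else []) = r.getD i [] := by
  split_ifs with h
  · rfl
  · simp [List.getD, List.getElem?_eq_none (by omega : r.length ≤ i)]

theorem pv_getD_map' {α : Type} (u : α → List Char) (l : List α) (d : α) (j : Nat)
    (hj : j < l.length) : (l.map u).getD j [] = u (l.getD j d) := by
  rw [List.getD_eq_getElem _ _ (by simpa using hj), List.getD_eq_getElem _ _ hj]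
  simp

-- pvFmtB as a range-map

theorem pv_fmtB_range (widths : List Nat) (row : List (List Char)) :
    pvFmtB widths row = ['|'] ++ PySem.Chars.join ['|']
        ((List.range widths.length).map
          (fun i => [' '] ++ pvLjust (row.getD i []) (widths.getD i 0) ++ [' '])) ++ ['|'] := by
  simp only [pvFmtB]
  have h0 : PySem.List.enumerate widths = PySem.List.enumerate widths ((0 : Nat) : Int) := by norm_num
  rw [h0, pv_enum_eq 0 widths 0, List.map_map]
  exact congrArg (fun z => ['|'] ++ PySem.Chars.join ['|'] z ++ ['|'])
    (List.map_congr_left (fun i _ => by simp))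

theorem pv_colwidths_getD (H : List (List Char)) (R : List (List (List Char))) (i : Nat)
    (hi : i < (pvColWidths H R).length) :
    (pvColWidths H R).getD i 0
      = List.foldl max (H.getD i []).length (R.map (fun r => (r.getD i []).length)) := by
  simp only [pvColWidths] at hi ⊢
  simp only [List.length_map, List.length_range] at hi
  rw [List.getD_eq_getElem _ _ (by simpa using hi)]
  simp only [List.getElem_map, List.getElem_range]
  have hcg : (H :: R).map (fun r => if i < r.length then (r.getD i []).length else 0)
      = (H :: R).map (fun r => (r.getD i []).length) := by
    apply List.map_congr_left
    intro r _
    split_ifs with hir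
    · rfl
    · simp [List.getD, List.getElem?_eq_none (by omega : r.length ≤ i)]
  rw [hcg, List.map_cons, List.foldl_cons, Nat.zero_max]

theorem pv_table_eq (h : List Char) (t : List (List Char)) :
    pvTable (h :: t) = pvRenderA (PySem.Chars.split₀ h) (t.map PySem.Chars.split₀) := by
  simp only [pvTable, pvRenderA]
  rw [pv_widths_eq]
  rw [List.map_cons]
  generalize PySem.Chars.split₀ h = H
  generalize List.map PySem.Chars.split₀ t = R
  -- column count = length of the width list
  have hN : ((PySem.List.max? ((H :: R).map (fun r => r.length)) (fun x => x)).getD 0)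
      = (pvColWidths H R).length := by
    rw [List.map_cons, PySem.List.max?_id_cons]
    simp only [Option.getD_some, pvColWidths, List.length_map, List.length_range,
      List.map_cons, List.foldl_cons, Nat.zero_max]
  rw [hN]
  set widths := pvColWidths H R with hwidths
  -- each padded cell of the header row has exactly width + 2 characters
  have hHle : ∀ i, i < widths.length → (H.getD i []).length ≤ widths.getD i 0 := by
    intro i hi
    rw [pv_colwidths_getD H R i hi]
    exact (PySem.List.le_foldl_max _ _).1
  -- the columns, normalized
  have hcols : (List.range widths.length).map (fun i =>
        ((H :: R).map (fun r => if i < r.length then r.getD i ([] : List Char) else [])).map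
          (fun v => [' '] ++ pvLjust v
            ((PySem.List.max?
              ((((H :: R).map (fun r => if i < r.length then r.getD i ([] : List Char) else [])).map
                (fun v => v.length))) (fun x => x)).getD 0) ++ [' ']))
      = (List.range widths.length).map (fun i =>
          (H :: R).map (fun r => [' '] ++ pvLjust (r.getD i []) (widths.getD i 0) ++ [' '])) := by
    apply List.map_congr_left
    intro i hi
    have hi' : i < widths.length := by simpa using hi
    have hg : (H :: R).map (fun r => if i < r.length then r.getD i ([] : List Char) else [])
        = (H :: R).map (fun r => r.getD i []) := by
      apply List.map_congr_left
      intro r _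
      exact pv_if_getD' r i
    rw [hg, List.map_map, List.map_map]
    have hwi : ((PySem.List.max? ((H :: R).map ((fun v => v.length) ∘ fun r => r.getD i []))
        (fun x => x)).getD 0) = widths.getD i 0 := by
      rw [show (H :: R).map ((fun v => v.length) ∘ fun r => r.getD i [])
            = (H.getD i []).length :: R.map (fun r => (r.getD i []).length) from by
          rw [List.map_cons]; rfl]
      rw [PySem.List.max?_id_cons]
      rw [pv_colwidths_getD H R i hi']
      rfl
    rw [hwi]
    rfl
  rw [hcols]
  -- the separator
  have hsep : (((List.range widths.length).map (fun i =>
        (H :: R).map (fun r => [' '] ++ pvLjust (r.getD i []) (widths.getD i 0) ++ [' ']))).map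
          (fun col => List.replicate (col.getD 0 ([] : List Char)).length '-'))
      = widths.map (fun w => List.replicate (w + 2) '-') := by
    rw [List.map_map]
    rw [show ((fun col => List.replicate (col.getD 0 ([] : List Char)).length '-') ∘ fun i =>
          (H :: R).map (fun r => [' '] ++ pvLjust (r.getD i []) (widths.getD i 0) ++ [' ']))
        = (fun i => List.replicate ([' '] ++ pvLjust (H.getD i []) (widths.getD i 0) ++ [' ']).length '-') from rfl]
    have : ∀ i ∈ List.range widths.length,
        List.replicate ([' '] ++ pvLjust (H.getD i []) (widths.getD i 0) ++ [' ']).length '-'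
          = List.replicate (widths.getD i 0 + 2) '-' := by
      intro i hi
      have hi' : i < widths.length := by simpa using hi
      simp only [List.length_append, List.length_singleton, pv_ljust_len _ _ (hHle i hi')]
      rw [show 1 + widths.getD i 0 + 1 = widths.getD i 0 + 2 from by omega]
    rw [List.map_congr_left this]
    exact pv_map_eq_range_map widths 0 (fun w => List.replicate (w + 2) '-')
  rw [hsep]
  have hsepA : (['+'] ++ PySem.Chars.join ['+'] (widths.map (fun w => List.replicate (w + 2) '-'))
      ++ ['+']) = pvSepA widths := rfl
  rw [hsepA]
  -- the row at index j of the transposed grid is a formatted row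
  have hrowlen : (H :: R).length = R.length + 1 := by simp
  have hrow : ∀ j, j < (H :: R).length →
      (['|'] ++ PySem.Chars.join ['|']
          (((List.range widths.length).map (fun i =>
            (H :: R).map (fun r => [' '] ++ pvLjust (r.getD i []) (widths.getD i 0) ++ [' ']))).map
              (fun col => col.getD j ([] : List Char))) ++ ['|'])
        = pvFmtB widths ((H :: R).getD j []) := by
    intro j hj
    rw [pv_fmtB_range]
    rw [List.map_map]
    exact congrArg (fun z => ['|'] ++ PySem.Chars.join ['|'] z ++ ['|'])
      (List.map_congr_left (fun i _ => by
        simp only [Function.comp_apply]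
        rw [pv_getD_map' (fun r => [' '] ++ pvLjust (r.getD i []) (widths.getD i 0) ++ [' '])
          (H :: R) [] j hj]))
  -- the whole rows list
  have hrows : (List.range (H :: R).length).map (fun j =>
        ['|'] ++ PySem.Chars.join ['|']
          (((List.range widths.length).map (fun i =>
            (H :: R).map (fun r => [' '] ++ pvLjust (r.getD i []) (widths.getD i 0) ++ [' ']))).map
              (fun col => col.getD j ([] : List Char))) ++ ['|'])
      = pvFmtB widths H :: R.map (pvFmtB widths) := by
    rw [show List.range (H :: R).length = 0 :: (List.range R.length).map Nat.succ from by
      rw [hrowlen, List.range_succ_eq_map]]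
    rw [List.map_cons]
    congr 1
    · have h0 := hrow 0 (by simp)
      simpa using h0
    · rw [List.map_map]
      have h1 : ∀ j ∈ List.range R.length,
          ((fun j => ['|'] ++ PySem.Chars.join ['|']
            (((List.range widths.length).map (fun i =>
              (H :: R).map (fun r => [' '] ++ pvLjust (r.getD i []) (widths.getD i 0) ++ [' ']))).map
                (fun col => col.getD j ([] : List Char))) ++ ['|']) ∘ Nat.succ) j
            = pvFmtB widths (R.getD j []) := by
        intro j hj
        have hj' : j < R.length := by simpa using hj
        simp only [Function.comp_apply]
        rw [hrow (j + 1) (by simpa using hj')]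
        rw [List.getD_cons_succ]
      rw [List.map_congr_left h1]
      exact pv_map_eq_range_map R [] (pvFmtB widths)
  rw [hrows]
  simp only [List.getD_cons_zero, List.drop_succ_cons, List.drop_zero]
  -- replace pvFmtA with pvFmtB on the A side
  have hHlen : H.length ≤ widths.length := by
    simp only [hwidths, pvColWidths, List.length_map, List.length_range, List.map_cons,
      List.foldl_cons, Nat.zero_max]
    exact (PySem.List.le_foldl_max _ _).1
  have hRlen : ∀ r ∈ R, r.length ≤ widths.length := by
    intro r hr
    simp only [hwidths, pvColWidths, List.length_map, List.length_range, List.map_cons,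
      List.foldl_cons, Nat.zero_max]
    exact (PySem.List.le_foldl_max _ _).2 r.length (by
      rw [List.mem_map]
      exact ⟨r, hr, rfl⟩)
  rw [pv_fmt_eq widths H hHlen]
  rw [List.map_congr_left (fun r hr => pv_fmt_eq widths r (hRlen r hr))]

theorem pv_section_eq (lines : List (List Char)) (a b : Nat) :
    "Chain ".toList ++ (PySem.List.pyGet? lines ((a : Nat) : Int)).getD []
        ++ (if (PySem.List.slice lines (some (((a : Nat) : Int) + 1)) (some ((b : Nat) : Int))).isEmpty
            then "\n (no rules)".toList
            else '\n' :: pvTable (PySem.List.slice lines (some (((a : Nat) : Int) + 1)) (some ((b : Nat) : Int))))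
      = pvSection (pvBlockAt lines (a, b)) := by
  have hc : ((a : Nat) : Int) + 1 = (((a + 1 : Nat)) : Int) := by push_cast; ring
  rw [hc, PySem.List.slice_natCast, PySem.List.pyGet?_natCast]
  have hget : (lines[a]?).getD [] = lines.getD a [] := rfl
  rw [hget]
  cases hbody : (lines.drop (a + 1)).take (b - (a + 1)) with
  | nil =>
    simp only [List.isEmpty_nil, if_pos]
    simp only [pvBlockAt, hbody, pvSection]
    simp
  | cons bh bt =>
    simp only [List.isEmpty_cons, Bool.false_eq_true, if_false]
    simp only [pvBlockAt, hbody, pvSection]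
    rw [if_neg (by simp)]
    rw [show (lines.getD a [] :: bh :: bt).getD 1 [] = bh from rfl]
    rw [show (lines.getD a [] :: bh :: bt).drop 2 = bt from rfl]
    rw [pv_table_eq bh bt]
    simp

-- ===== VERDICT (by name: the statement is the Claim_ definition above) =====
theorem format_iptables_output_py_spec : Claim_equal_format_iptables_output_py := by
  intro text _
  show format_iptables_output_py text = format_iptables_output_py_alt text
  simp only [format_iptables_output_py, format_iptables_output_py_alt]
  set L := ((PySem.Str.splitlines text).map String.toList).filter
      (fun ln => !(PySem.Chars.strip ln).isEmpty) with hL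
  -- A's loop over all lines equals its loop over the non-blank lines L
  have hmem : ∀ ln ∈ L, (PySem.Chars.strip ln).isEmpty = false := by
    intro ln hln
    have := (List.mem_filter.1 hln).2
    simpa using this
  rw [pv_foldA_filter]
  have hmain := pv_main_none L hmem ([] : List (List Char)) ([] : List (List (List Char)))
  rcases hst : L.foldl pvStepA (([] : List (List Char)), none, [], []) with ⟨secs, cur, hs, rs⟩
  rw [hst] at hmain
  simp only [pvFinishA] at hmain
  show String.ofList (PySem.Chars.join "\n\n".toList (pvFlushA secs cur hs rs)) = _
  rw [hmain]
  -- B's sections are the sections of the blocks cut out by the index pairs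
  congr 1
  rw [pv_starts_eq L]
  rw [show List.drop 1 (List.map (fun i : Nat => (i : Int)) (pvSN L))
        = List.map (fun i : Nat => (i : Int)) (List.drop 1 (pvSN L)) from List.map_drop.symm]
  rw [show [(L.length : Int)] = List.map (fun i : Nat => (i : Int)) [L.length] from rfl]
  rw [← List.map_append, List.zip_map, List.map_map]
  have hsec : ∀ q ∈ (pvSN L).zip ((pvSN L).drop 1 ++ [L.length]),
      ((fun p : Int × Int =>
          "Chain ".toList ++ (PySem.List.pyGet? L p.1).getD []
            ++ (if (PySem.List.slice L (some (p.1 + 1)) (some p.2)).isEmpty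
                then "\n (no rules)".toList
                else '\n' :: pvTable (PySem.List.slice L (some (p.1 + 1)) (some p.2)))) ∘
        (Prod.map (fun i : Nat => (i : Int)) (fun i : Nat => (i : Int)))) q
        = pvSection (pvBlockAt L q) := by
    intro q _
    obtain ⟨a, b⟩ := q
    simp only [Function.comp_apply, Prod.map_apply]
    exact pv_section_eq L a b
  rw [List.map_congr_left hsec]
  rw [show (fun q => pvSection (pvBlockAt L q))
        = pvSection ∘ pvBlockAt L from rfl]
  rw [← List.map_map, pv_blocks_eq L]
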